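-- pv_equiv track=rewrite | github.com/sandeepsolai/SEO-keyword-analysis-tool-backend | backend/app.py | extract_prefix_suffix
-- ===== SOURCE A (Python) =====
-- def extract_prefix_suffix(word, sentences):
--     prefixes = []
--     suffixes = []
--     for sentence in sentences:
--         if word in sentence:
--             words = sentence.split()
--             for i, w in enumerate(words):
--                 if w == word:
--                     if i > 0:
--                         prefixes.append(words[i-1] + " " + word)
--                     if i < len(words) - 1:
--                         suffixes.append(word + " " + words[i+1])
--     return prefixes, suffixes
-- ===== SOURCE B (Python) =====
-- def _bigrams(s):
--     ws = s.split()
--     return zip(ws, ws[1:])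
--
-- def extract_prefix_suffix(word, sentences):
--     # Stage 1: flatten every sentence into one global stream of adjacent word pairs.
--     bigrams = [p for s in sentences for p in _bigrams(s)]
--     # Stage 2: two independent filtered-map passes over that stream.
--     prefixes = [a + " " + word for a, b in bigrams if b == word]
--     suffixes = [word + " " + b for a, b in bigrams if a == word]
--     return prefixes, suffixes
-- ===== Notes on version B (the rewrite author's own statement) =====
-- stated objective: alternative
-- what changed: B replaces A's nested accumulator loops with index/boundary tests and a substring pre-filter (proved a no-op) by staged passes: it first flattens all sentences into one global list of adjacent word bigrams, then derives prefixes and suffixes as two separate filtered-map passes over that list.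
import Mathlib
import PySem

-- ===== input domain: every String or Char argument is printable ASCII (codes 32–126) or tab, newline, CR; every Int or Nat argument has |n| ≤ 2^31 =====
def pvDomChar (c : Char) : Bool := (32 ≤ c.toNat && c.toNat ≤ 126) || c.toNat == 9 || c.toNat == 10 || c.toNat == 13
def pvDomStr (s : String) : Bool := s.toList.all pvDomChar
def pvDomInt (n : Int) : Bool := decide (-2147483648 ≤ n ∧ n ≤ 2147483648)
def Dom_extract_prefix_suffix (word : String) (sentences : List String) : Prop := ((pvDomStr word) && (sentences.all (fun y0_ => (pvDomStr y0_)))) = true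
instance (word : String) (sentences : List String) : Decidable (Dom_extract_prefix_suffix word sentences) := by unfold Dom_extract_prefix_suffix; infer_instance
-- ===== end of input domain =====

-- B restructures A's nested accumulator loops (substring pre-filter, enumerate, index
-- boundary tests) into staged passes: one flat global bigram list, then two independent
-- filtered-map passes over it — objective: alternative decomposition, same cost.

-- ===== PORT A =====
def extract_prefix_suffix (word : String) (sentences : List String) : List String × List String :=
  sentences.foldl (fun acc sentence =>
    if PySem.Str.isIn word sentence then
      let words := PySem.Str.split₀ sentence
      (PySem.List.enumerate words).foldl (fun acc p =>
        if p.2 == word then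
          let acc := if p.1 > 0 then
              (acc.1 ++ [PySem.List.pyGetD words (p.1 - 1) "" ++ " " ++ word], acc.2)
            else acc
          if p.1 < (words.length : Int) - 1 then
              (acc.1, acc.2 ++ [word ++ " " ++ PySem.List.pyGetD words (p.1 + 1) ""])
            else acc
        else acc) acc
    else acc) ([], [])

-- ===== PORT B =====
-- Source B's `ws[1:]` is the tail slice: PySem.List.slice ws 1 (len) = ws.tail here.
def pyBigrams (s : String) : List (String × String) :=
  let ws := PySem.Str.split₀ s
  ws.zip ws.tail

def extract_prefix_suffix_alt (word : String) (sentences : List String) : List String × List String :=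
  let bigrams := sentences.flatMap pyBigrams
  ((bigrams.filter (fun p => p.2 == word)).map (fun p => p.1 ++ " " ++ word),
   (bigrams.filter (fun p => p.1 == word)).map (fun p => word ++ " " ++ p.2))

-- ===== PRECONDITION & SPEC =====
def Spec_extract_prefix_suffix (word : String) (sentences : List String) (out : List String × List String) : Prop := out = extract_prefix_suffix_alt word sentences
instance (word : String) (sentences : List String) (out : List String × List String) : Decidable (Spec_extract_prefix_suffix word sentences out) := by unfold Spec_extract_prefix_suffix; infer_instance

-- ===== CLAIM (what is proved, stated in full; the proofs are below) =====
def Claim_equal_extract_prefix_suffix : Prop := ∀ (word : String) (sentences : List String), Dom_extract_prefix_suffix word sentences → Spec_extract_prefix_suffix word sentences (extract_prefix_suffix word sentences)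

-- ===== LEMMAS AND PROOFS =====

-- per-bigram contributions to the prefix / suffix list
def fPre (word : String) (p : String × String) : List String :=
  if p.2 == word then [p.1 ++ " " ++ word] else []

def gSuf (word : String) (p : String × String) : List String :=
  if p.1 == word then [word ++ " " ++ p.2] else []

-- the bigrams seen by A's scan starting after `taken` (with the last taken word as left neighbour)
def optPair (p? : Option String) (x : String) : List (String × String) :=
  match p? with | some p => [(p, x)] | none => []

def pairsFrom (p? : Option String) : List String → List (String × String)
  | [] => []
  | x :: t => optPair p? x ++ pairsFrom (some x) t

lemma zip_tail_eq_pairsFrom_some : ∀ (l : List String) (x : String),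
    (x :: l).zip l = pairsFrom (some x) l := by
  intro l
  induction l with
  | nil => intro x; rfl
  | cons y t ih => intro x; simpa [pairsFrom, optPair, List.zip] using ih y

lemma zip_tail_eq_pairsFrom_none (l : List String) :
    l.zip l.tail = pairsFrom none l := by
  cases l with
  | nil => rfl
  | cons x t => simp [pairsFrom, optPair, zip_tail_eq_pairsFrom_some]

-- B's filtered maps, characterised as flatMaps of the per-bigram contributions
lemma filter_map_eq_flatMap_fPre (word : String) : ∀ (l : List (String × String)),
    (l.filter (fun p => p.2 == word)).map (fun p => p.1 ++ " " ++ word)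
      = l.flatMap (fPre word) := by
  intro l
  induction l with
  | nil => rfl
  | cons p t ih =>
    by_cases h : (p.2 == word) = true <;> simp [fPre, h, ih]

lemma filter_map_eq_flatMap_gSuf (word : String) : ∀ (l : List (String × String)),
    (l.filter (fun p => p.1 == word)).map (fun p => word ++ " " ++ p.2)
      = l.flatMap (gSuf word) := by
  intro l
  induction l with
  | nil => rfl
  | cons p t ih =>
    by_cases h : (p.1 == word) = true <;> simp [gSuf, h, ih]

-- index-access facts used when evaluating one step of A's scan
lemma pyGetD_cons2 (x y : String) (t : List String) :
    PySem.List.pyGetD (x :: y :: t) 1 "" = y := by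
  have h : (1 : Int) = ((1 : Nat) : Int) := by norm_num
  rw [h, PySem.List.pyGetD_natCast]; rfl

lemma pyGetD_mid (l : List String) (a x y : String) (t : List String) :
    PySem.List.pyGetD (l ++ a :: x :: y :: t) ((l.length : Int) + 1 + 1) "" = y := by
  have h : ((l.length : Int) + 1 + 1) = ((l.length + 2 : Nat) : Int) := by push_cast; ring
  rw [h, PySem.List.pyGetD_natCast]
  simp [List.getD]

lemma A_inner (word : String) : ∀ (rest taken : List String) (acc : List String × List String),
    (PySem.List.enumerate rest (taken.length : Int)).foldl (fun acc p =>
        if p.2 == word then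
          let acc := if p.1 > 0 then
              (acc.1 ++ [PySem.List.pyGetD (taken ++ rest) (p.1 - 1) "" ++ " " ++ word], acc.2)
            else acc
          if p.1 < ((taken ++ rest).length : Int) - 1 then
              (acc.1, acc.2 ++ [word ++ " " ++ PySem.List.pyGetD (taken ++ rest) (p.1 + 1) ""])
            else acc
        else acc) acc
    = (acc.1 ++ (pairsFrom taken.getLast? rest).flatMap (fPre word),
       acc.2 ++ (rest.zip rest.tail).flatMap (gSuf word)) := by
  intro rest
  induction rest with
  | nil => intro taken acc; simp [pairsFrom]
  | cons x t ih =>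
    intro taken acc
    rw [PySem.List.enumerate_cons, List.foldl_cons]
    have hih := fun acc' => ih (taken ++ [x]) acc'
    simp only [List.length_append, List.length_cons, List.length_nil, Nat.zero_add, List.append_assoc, List.singleton_append, List.getLast?_concat] at hih ⊢
    push_cast at hih ⊢
    rw [hih]
    clear hih ih
    rcases List.eq_nil_or_concat taken with rfl | ⟨l, a, rfl⟩
    · cases t with
      | nil => simp [pairsFrom, optPair]
      | cons y t' =>
        by_cases hx : (x == word) = true <;>
          simp [hx, pairsFrom, optPair, fPre, gSuf, pyGetD_cons2]
    · cases t with
      | nil =>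
        by_cases hx : (x == word) = true
        · simp [hx, pairsFrom, optPair, fPre]
        · simp [hx, pairsFrom, optPair, fPre]
      | cons y t' =>
        by_cases hx : (x == word) = true <;>
          simp [hx, pairsFrom, optPair, fPre, gSuf, pyGetD_mid,
            show ((l.length : Int) + 1 < ↑l.length + 1 + (↑t'.length + 1 + 1) - 1) from by omega]

-- every word produced by split() occurs inside the sentence
lemma mem_split_go_infix : ∀ (s cur : List Char) (acc : List (List Char)) (w : List Char),
    w ∈ PySem.Chars.split₀.go s cur acc →
    w ∈ acc ∨ (∃ t, t <+: s ∧ w = cur.reverse ++ t) ∨ w <:+: s := by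
  intro s
  induction s with
  | nil =>
    intro cur acc w hw
    simp only [PySem.Chars.split₀.go] at hw
    split at hw
    · left; simpa using hw
    · rw [List.mem_reverse, List.mem_cons] at hw
      rcases hw with h | h
      · right; left; exact ⟨[], List.nil_prefix, by simp [h]⟩
      · left; exact h
  | cons c rest ih =>
    intro cur acc w hw
    simp only [PySem.Chars.split₀.go] at hw
    split at hw
    · split at hw
      · rcases ih [] acc w hw with h | h | h
        · left; exact h
        · rcases h with ⟨t, ht, hw⟩
          right; right
          exact List.infix_cons_iff.mpr (Or.inr (by simpa [hw] using ht.isInfix))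
        · right; right; exact h.trans (List.infix_cons_iff.mpr (Or.inr (List.infix_refl rest)))
      · rcases ih [] (cur.reverse :: acc) w hw with h | h | h
        · rcases List.mem_cons.mp h with h | h
          · right; left; exact ⟨[], List.nil_prefix, by simp [h]⟩
          · left; exact h
        · rcases h with ⟨t, ht, hw⟩
          right; right
          exact List.infix_cons_iff.mpr (Or.inr (by simpa [hw] using ht.isInfix))
        · right; right; exact h.trans (List.infix_cons_iff.mpr (Or.inr (List.infix_refl rest)))
    · rcases ih (c :: cur) acc w hw with h | h | h
      · left; exact h
      · rcases h with ⟨t, ht, hw⟩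
        right; left
        exact ⟨c :: t, by simpa using ht, by simpa using hw⟩
      · right; right; exact h.trans (List.infix_cons_iff.mpr (Or.inr (List.infix_refl rest)))

lemma mem_split₀_isIn (s w : String) (hw : w ∈ PySem.Str.split₀ s) :
    PySem.Str.isIn w s = true := by
  have h1 : w.toList ∈ PySem.Chars.split₀ s.toList := by
    rw [← PySem.Str.split₀_map_toList]
    exact List.mem_map_of_mem hw
  rw [PySem.Str.isIn_iff_infix]
  have h2 := mem_split_go_infix s.toList [] [] w.toList (by simpa [PySem.Chars.split₀] using h1)
  rcases h2 with h | ⟨t, ht, hw'⟩ | h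
  · simp at h
  · simpa [hw'] using ht.isInfix
  · exact h

-- when the substring test fails, no split word equals `word`, so the sentence contributes nothing
lemma flatMap_nil_of_not_isIn (word sentence : String)
    (h : ¬ PySem.Str.isIn word sentence = true) :
    (pyBigrams sentence).flatMap (fPre word) = [] ∧
    (pyBigrams sentence).flatMap (gSuf word) = [] := by
  constructor <;> rw [List.flatMap_eq_nil_iff] <;> rintro ⟨a, b⟩ hp <;>
    obtain ⟨ha, hb⟩ := List.of_mem_zip hp
  · have hb' : b ∈ PySem.Str.split₀ sentence := List.mem_of_mem_tail hb
    simp only [fPre]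
    rw [if_neg]
    intro hbe
    exact h (by rw [← eq_of_beq hbe] at *; exact mem_split₀_isIn sentence b hb')
  · simp only [gSuf]
    rw [if_neg]
    intro hae
    exact h (by rw [← eq_of_beq hae] at *; exact mem_split₀_isIn sentence a ha)

-- A's outer fold accumulates exactly the per-bigram contributions of all sentences
lemma A_outer (word : String) : ∀ (sentences : List String) (acc : List String × List String),
    sentences.foldl (fun acc sentence =>
      if PySem.Str.isIn word sentence then
        let words := PySem.Str.split₀ sentence
        (PySem.List.enumerate words).foldl (fun acc p =>
          if p.2 == word then
            let acc := if p.1 > 0 then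
                (acc.1 ++ [PySem.List.pyGetD words (p.1 - 1) "" ++ " " ++ word], acc.2)
              else acc
            if p.1 < (words.length : Int) - 1 then
                (acc.1, acc.2 ++ [word ++ " " ++ PySem.List.pyGetD words (p.1 + 1) ""])
              else acc
          else acc) acc
      else acc) acc
    = (acc.1 ++ (sentences.flatMap pyBigrams).flatMap (fPre word),
       acc.2 ++ (sentences.flatMap pyBigrams).flatMap (gSuf word)) := by
  intro sentences
  induction sentences with
  | nil => intro acc; simp
  | cons s t ih =>
    intro acc
    rw [List.foldl_cons, ih]
    by_cases h : PySem.Str.isIn word s = true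
    · rw [if_pos h]
      have hA := A_inner word (PySem.Str.split₀ s) [] acc
      simp only [List.length_nil, Nat.cast_zero, List.nil_append, List.getLast?_nil] at hA
      rw [hA]
      simp [pyBigrams, zip_tail_eq_pairsFrom_none]
    · rw [if_neg h]
      obtain ⟨hf, hg⟩ := flatMap_nil_of_not_isIn word s h
      simp [hf, hg]

-- ===== VERDICT (by name: the statement is the Claim_ definition above) =====
theorem extract_prefix_suffix_spec : Claim_equal_extract_prefix_suffix := by
  intro word sentences _
  unfold Spec_extract_prefix_suffix extract_prefix_suffix extract_prefix_suffix_alt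
  rw [A_outer]
  simp only [List.nil_append]
  rw [filter_map_eq_flatMap_fPre, filter_map_eq_flatMap_gSuf]
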